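-- pv_equiv track=rewrite | github.com/sinhaapurva25/python | HackerRank-ProblemSolving/queens-attack-2-cpy.py | leftBottomDiagnol
-- ===== SOURCE A (Python) =====
-- def leftBottomDiagnol(subLst, r, c, n, obstacles):
--     while 1:
--         if r == 1 or c == n or ([r, c] in obstacles):
--             break
--         else:
--             r -= 1
--             c += 1
--             subLst.append([r, c])
--     return subLst
-- ===== SOURCE B (Python) =====
-- def leftBottomDiagnol(subLst, r, c, n, obstacles):
--     if [r, c] in obstacles:
--         return subLst
--     dists = [d for d in (r - 1, n - c) if d >= 0]
--     steps = min(dists) if dists else 0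
--     path = [[r - i, c + i] for i in range(1, steps + 1)]
--     for k, cell in enumerate(path):
--         if cell in obstacles:
--             subLst.extend(path[:k + 1])
--             return subLst
--     subLst.extend(path)
--     return subLst
-- ===== Notes on version B (the rewrite author's own statement) =====
-- stated objective: simpler
-- what changed: Replaces the per-step while-loop with its edge tests by a closed-form distance to the nearest stop line (steps = min of the non-negative of r-1 and n-c), a list-comprehension building the whole diagonal path, and a single scan that truncates inclusively at the first obstacle.
-- outside the precondition, e.g. on leftBottomDiagnol([], 0, 5, 3, [[-2, 7]]): A returns [[-1, 6], [-2, 7]], B returns []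
import Mathlib
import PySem

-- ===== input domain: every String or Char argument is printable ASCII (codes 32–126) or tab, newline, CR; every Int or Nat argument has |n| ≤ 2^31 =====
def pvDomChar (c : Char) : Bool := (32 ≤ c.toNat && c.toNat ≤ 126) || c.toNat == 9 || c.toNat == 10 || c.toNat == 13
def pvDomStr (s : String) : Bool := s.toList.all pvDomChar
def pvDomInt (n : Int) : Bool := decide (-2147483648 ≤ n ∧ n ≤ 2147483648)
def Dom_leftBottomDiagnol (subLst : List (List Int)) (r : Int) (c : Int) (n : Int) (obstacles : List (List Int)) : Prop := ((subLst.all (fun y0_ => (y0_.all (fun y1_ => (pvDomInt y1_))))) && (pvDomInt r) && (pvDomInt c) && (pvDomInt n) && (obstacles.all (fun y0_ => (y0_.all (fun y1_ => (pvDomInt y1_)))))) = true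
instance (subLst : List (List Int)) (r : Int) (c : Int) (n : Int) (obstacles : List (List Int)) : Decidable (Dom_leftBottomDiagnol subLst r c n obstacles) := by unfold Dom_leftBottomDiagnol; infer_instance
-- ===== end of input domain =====

-- B computes the diagonal via a closed-form distance to the nearest stop line and one truncating scan instead of A's stepwise while-loop; objective: simpler. Both Pythons mutate subLst in place (append/extend); the equivalence proved is about the return value.


-- ===== PORT A =====
-- A's while-loop, made total with a fuel guard: the fuel (distance to either edge plus the
-- distances to all obstacles) bounds the number of iterations whenever the loop terminates
-- (in particular inside Pre_), so the guard never fires on any input where Python A returns.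
def lbdGo (fuel : Nat) (subLst : List (List Int)) (r : Int) (c : Int) (n : Int) (obstacles : List (List Int)) : List (List Int) :=
  match fuel with
  | 0 => subLst
  | fuel + 1 =>
    if r = 1 ∨ c = n ∨ [r, c] ∈ obstacles then subLst
    else lbdGo fuel (subLst ++ [[r - 1, c + 1]]) (r - 1) (c + 1) n obstacles

def leftBottomDiagnol (subLst : List (List Int)) (r : Int) (c : Int) (n : Int) (obstacles : List (List Int)) : List (List Int) :=
  lbdGo ((max (r - 1) (n - c)).toNat + obstacles.foldl (fun acc o => acc + (r - o.headI).toNat) 0) subLst r c n obstacles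

-- ===== PORT B =====
-- the 'for k, cell in enumerate(path): if cell in obstacles: subLst.extend(path[:k+1]); return' scan of Source B
def lbdScan (subLst : List (List Int)) (path : List (List Int)) (obstacles : List (List Int)) (k : Nat) (full : List (List Int)) : List (List Int) :=
  match path with
  | [] => subLst ++ full
  | cell :: rest =>
    if cell ∈ obstacles then subLst ++ full.take (k + 1)
    else lbdScan subLst rest obstacles (k + 1) full

def leftBottomDiagnol_alt (subLst : List (List Int)) (r : Int) (c : Int) (n : Int) (obstacles : List (List Int)) : List (List Int) :=
  if [r, c] ∈ obstacles then subLst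
  else
    let dists := ([r - 1, n - c] : List Int).filter (fun d => 0 ≤ d)
    let steps := if dists ≠ [] then (PySem.List.min? dists (fun x => x)).getD 0 else 0
    let path := (PySem.List.pyRange 1 (steps + 1) 1).map (fun i => [r - i, c + i])
    lbdScan subLst path obstacles 0 path

-- ===== PRECONDITION & SPEC =====
-- Pre_ excludes only the start positions past both stop lines (r < 1 and c > n), where A's
-- loop never reaches either stop test and diverges unless an obstacle happens to lie on the diagonal.
def Pre_leftBottomDiagnol (subLst : List (List Int)) (r : Int) (c : Int) (n : Int) (obstacles : List (List Int)) : Prop :=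
  1 ≤ r ∨ c ≤ n
instance (subLst : List (List Int)) (r : Int) (c : Int) (n : Int) (obstacles : List (List Int)) : Decidable (Pre_leftBottomDiagnol subLst r c n obstacles) := by unfold Pre_leftBottomDiagnol; infer_instance

def pvWitness_leftBottomDiagnol : List (List Int) × Int × Int × Int × List (List Int) := ([], 4, 1, 4, [[2, 3]])

def Spec_leftBottomDiagnol (subLst : List (List Int)) (r : Int) (c : Int) (n : Int) (obstacles : List (List Int)) (out : List (List Int)) : Prop := out = leftBottomDiagnol_alt subLst r c n obstacles
instance (subLst : List (List Int)) (r : Int) (c : Int) (n : Int) (obstacles : List (List Int)) (out : List (List Int)) : Decidable (Spec_leftBottomDiagnol subLst r c n obstacles out) := by unfold Spec_leftBottomDiagnol; infer_instance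

-- ===== CLAIM (what is proved, stated in full; the proofs are below) =====
def Claim_equal_leftBottomDiagnol : Prop := ∀ (subLst : List (List Int)) (r : Int) (c : Int) (n : Int) (obstacles : List (List Int)), Dom_leftBottomDiagnol subLst r c n obstacles → Pre_leftBottomDiagnol subLst r c n obstacles → Spec_leftBottomDiagnol subLst r c n obstacles (leftBottomDiagnol subLst r c n obstacles)

-- ===== LEMMAS AND PROOFS =====

-- the number of steps A's loop takes before hitting a stop line (absent obstacles)
def lbdEff (r c n : Int) : Int :=
  if 0 ≤ r - 1 ∧ 0 ≤ n - c then min (r - 1) (n - c)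
  else if 0 ≤ r - 1 then r - 1
  else n - c

-- the inclusive take-until-first-obstacle of a path
def lbdIncl (path : List (List Int)) (obstacles : List (List Int)) : List (List Int) :=
  match path with
  | [] => []
  | cell :: rest => if cell ∈ obstacles then [cell] else cell :: lbdIncl rest obstacles

-- the diagonal path, built stepwise
def lbdPath (s : Nat) (r : Int) (c : Int) : List (List Int) :=
  match s with
  | 0 => []
  | s + 1 => [r - 1, c + 1] :: lbdPath s (r - 1) (c + 1)

theorem lbdScan_eq (obstacles subLst : List (List Int)) :
    ∀ (path pre : List (List Int)),
      lbdScan subLst path obstacles pre.length (pre ++ path) = subLst ++ pre ++ lbdIncl path obstacles := by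
  intro path
  induction path with
  | nil => intro pre; simp [lbdScan, lbdIncl]
  | cons cell rest ih =>
    intro pre
    have h2 : pre ++ cell :: rest = (pre ++ [cell]) ++ rest := by simp
    have hl : pre.length + 1 = (pre ++ [cell]).length := by simp
    by_cases hc : cell ∈ obstacles
    · have ht : (pre ++ cell :: rest).take (pre.length + 1) = pre ++ [cell] := by
        rw [h2, hl, List.take_left]
      simp [lbdScan, hc, lbdIncl, ht]
    · simp only [lbdScan, if_neg hc, lbdIncl]
      rw [h2, hl, ih (pre ++ [cell])]
      simp

theorem lbdPath_eq (s : Nat) : ∀ (r c : Int),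
    (PySem.List.pyRange 1 ((s : Int) + 1) 1).map (fun i => [r - i, c + i]) = lbdPath s r c := by
  induction s with
  | zero =>
    intro r c
    simp [PySem.List.pyRange_one_eq_nil, lbdPath]
  | succ s ih =>
    intro r c
    have hcast : (((s + 1 : Nat) : Int)) + 1 = (s : Int) + 1 + 1 := by push_cast; ring
    rw [hcast, PySem.List.pyRange_one_cons (by omega : (1:Int) < (s:Int)+1+1), List.map_cons]
    unfold lbdPath
    congr 1
    rw [← ih (r - 1) (c + 1), PySem.List.pyRange_one, PySem.List.pyRange_one]
    have hlen : ((s:Int)+1+1-(1+1)).toNat = ((s:Int)+1-1).toNat := by omega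
    rw [hlen]
    simp only [List.map_map]
    apply List.map_congr_left
    intro k _
    simp only [Function.comp_apply, List.cons.injEq, and_true]
    constructor <;> ring

theorem lbdGo_eq (n : Int) (obstacles : List (List Int)) :
    ∀ (s fuel : Nat) (subLst : List (List Int)) (r c : Int),
      (1 ≤ r ∨ c ≤ n) → s = (lbdEff r c n).toNat → s ≤ fuel →
      lbdGo fuel subLst r c n obstacles =
        if [r, c] ∈ obstacles then subLst else subLst ++ lbdIncl (lbdPath s r c) obstacles := by
  intro s
  induction s with
  | zero =>
    intro fuel subLst r c htot hs hf
    have hstop : r = 1 ∨ c = n := by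
      unfold lbdEff at hs; split_ifs at hs <;> omega
    have hcond : r = 1 ∨ c = n ∨ [r, c] ∈ obstacles := by tauto
    cases fuel with
    | zero => simp [lbdGo, lbdPath, lbdIncl]
    | succ fuel =>
      simp only [lbdGo, if_pos hcond]
      simp [lbdPath, lbdIncl]
  | succ s ih =>
    intro fuel subLst r c htot hs hf
    have heff : 0 ≤ lbdEff r c n := by omega
    have hr1 : r ≠ 1 := by
      intro h; subst h; unfold lbdEff at hs; split_ifs at hs <;> omega
    have hcn : c ≠ n := by
      intro h; subst h; unfold lbdEff at hs; split_ifs at hs <;> omega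
    have hdec : s = (lbdEff (r - 1) (c + 1) n).toNat := by
      unfold lbdEff at hs ⊢; split_ifs at hs ⊢ <;> omega
    have htot' : 1 ≤ r - 1 ∨ c + 1 ≤ n := by
      rcases htot with h | h
      · left; omega
      · right; omega
    cases fuel with
    | zero => omega
    | succ fuel =>
      by_cases hobs : [r, c] ∈ obstacles
      · simp [lbdGo, hobs]
      · have hcond : ¬ (r = 1 ∨ c = n ∨ [r, c] ∈ obstacles) := by tauto
        simp only [lbdGo, if_neg hcond, if_neg hobs]
        rw [ih fuel (subLst ++ [[r - 1, c + 1]]) (r - 1) (c + 1) htot' hdec (by omega)]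
        simp only [lbdPath]
        by_cases h2 : [r - 1, c + 1] ∈ obstacles
        · simp [h2, lbdIncl]
        · simp [h2, lbdIncl]

-- B's computed step count equals lbdEff on terminating inputs
theorem lbdSteps_eq (r c n : Int) (htot : 1 ≤ r ∨ c ≤ n) :
    (if (([r - 1, n - c] : List Int).filter (fun d => 0 ≤ d)) ≠ [] then
      (PySem.List.min? (([r - 1, n - c] : List Int).filter (fun d => 0 ≤ d)) (fun x => x)).getD 0 else 0)
    = lbdEff r c n := by
  unfold lbdEff
  by_cases h1 : 1 ≤ r <;> by_cases h2 : c ≤ n <;>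
    simp [List.filter, h1, h2, PySem.List.min?, min_def] <;>
    (try split_ifs) <;> (try simp only [Option.getD_some]) <;> omega

-- ===== VERDICT (by name: the statement is the Claim_ definition above) =====
theorem leftBottomDiagnol_spec : Claim_equal_leftBottomDiagnol := by
  intro subLst r c n obstacles _ hpre
  unfold Spec_leftBottomDiagnol leftBottomDiagnol leftBottomDiagnol_alt
  set s : Nat := (lbdEff r c n).toNat with hs
  have heff : 0 ≤ lbdEff r c n := by
    unfold lbdEff; unfold Pre_leftBottomDiagnol at hpre; split_ifs <;> omega
  have hfuel1 : s ≤ (max (r - 1) (n - c)).toNat := by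
    unfold lbdEff at hs; split_ifs at hs <;> omega
  have hfuel : s ≤ (max (r - 1) (n - c)).toNat + obstacles.foldl (fun acc o => acc + (r - o.headI).toNat) 0 :=
    le_trans hfuel1 (Nat.le_add_right _ _)
  rw [lbdGo_eq n obstacles s _ subLst r c hpre rfl hfuel]
  by_cases hobs : [r, c] ∈ obstacles
  · simp [hobs]
  · simp only [if_neg hobs, lbdSteps_eq r c n hpre]
    have hcast : lbdEff r c n = (s : Int) := by omega
    rw [hcast, lbdPath_eq s r c]
    have := lbdScan_eq obstacles subLst (lbdPath s r c) []
    simpa using this.symm
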